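-- pv_equiv track=rewrite | github.com/JianhongTu/RCAbench | src/rcabench/server/eval_utils.py | _normalize_file_path
-- ===== SOURCE A (Python) =====
-- def _normalize_file_path(path: str) -> str:
--     """
--     Normalize file paths for comparison by:
--     1. Removing leading/trailing slashes
--     2. Normalizing path separators
--     3. Removing common workspace prefixes (iteratively to handle nested prefixes)
--     4. Extracting canonical relative path
--
--     Examples:
--     - "src-vul/graphicsmagick/magick/render.c" -> "magick/render.c"
--     - "graphicsmagick/magick/render.c" -> "magick/render.c"
--     - "magick/render.c" -> "magick/render.c"
--     - "render.c" -> "render.c"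
--     """
--     if not path:
--         return path
--     # Normalize path separators
--     normalized = path.replace("\\", "/")
--     # Remove leading/trailing slashes
--     normalized = normalized.strip("/")
--
--     # Common workspace root prefixes to remove (order matters - remove longer/more specific first)
--     # These are prefixes that might appear in workspace structures
--     prefixes_to_remove = [
--         "src-vul/",
--         "src/",
--         "graphicsmagick/",
--         "repo-vul/",
--         "workspace/",
--         "codebase/",
--     ]
--
--     # Iteratively remove prefixes until no more can be removed
--     # This handles nested cases like "src-vul/graphicsmagick/magick/render.c"
--     changed = True
--     while changed:
--         changed = False
--         for prefix in prefixes_to_remove: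
--             if normalized.startswith(prefix):
--                 normalized = normalized[len(prefix):]
--                 changed = True
--                 break
--
--     return normalized
-- ===== SOURCE B (Python) =====
-- def _normalize_file_path(path: str) -> str:
--     if not path:
--         return path
--     normalized = path.replace("\\", "/").strip("/")
--     parts = normalized.split("/")
--     names = ("src-vul", "src", "graphicsmagick", "repo-vul", "workspace", "codebase")
--     i = 0
--     # walk over leading components that are known workspace prefixes,
--     # never consuming the last component
--     while i < len(parts) - 1 and parts[i] in names:
--         i += 1
--     return "/".join(parts[i:])
-- ===== Notes on version B (the rewrite author's own statement) =====
-- stated objective: idiomatic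
-- what changed: Replaces the restart-on-change while/for loop of iterative string-prefix chopping with a single tokenization: split on '/', advance an index over leading components that are known prefix names (never past the last component), and rejoin.
import Mathlib
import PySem

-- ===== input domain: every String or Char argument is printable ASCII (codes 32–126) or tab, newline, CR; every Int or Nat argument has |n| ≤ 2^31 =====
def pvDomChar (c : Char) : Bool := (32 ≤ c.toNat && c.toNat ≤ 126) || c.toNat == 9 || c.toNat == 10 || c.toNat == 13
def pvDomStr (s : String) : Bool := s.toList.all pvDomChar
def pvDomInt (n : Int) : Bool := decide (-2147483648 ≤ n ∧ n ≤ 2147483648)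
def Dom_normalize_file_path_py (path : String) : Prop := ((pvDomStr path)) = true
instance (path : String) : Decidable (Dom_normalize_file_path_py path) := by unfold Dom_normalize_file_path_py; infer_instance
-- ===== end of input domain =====

-- B replaces A's restart-on-change iterative string-prefix chopping by split-on-'/' /
-- index-walk over leading prefix components / rejoin (idiomatic, not claimed faster).

-- ===== PORT A =====
-- A's `prefixes_to_remove` (each Python string literal written as its list of chars)
def pvPrefixes : List (List Char) :=
  [ ['s','r','c','-','v','u','l','/'],
    ['s','r','c','/'],
    ['g','r','a','p','h','i','c','s','m','a','g','i','c','k','/'],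
    ['r','e','p','o','-','v','u','l','/'],
    ['w','o','r','k','s','p','a','c','e','/'],
    ['c','o','d','e','b','a','s','e','/'] ]

-- A's `while changed: for prefix …: if startswith: drop it; break` — each pass takes the
-- first matching prefix (find? scans in the list's order, as the for loop does), drops it
-- (`normalized[len(prefix):]` = List.drop, exact for a nonnegative index) and restarts.
def pvChop (s : List Char) : List Char :=
  match h : pvPrefixes.find? (fun p => PySem.Chars.startswith s p) with
  | some p => pvChop (s.drop p.length)
  | none => s
  termination_by s.length
  decreasing_by
    have hm := List.mem_of_find?_eq_some h
    have hp : p <+: s := (PySem.Chars.startswith_iff ..).mp (by simpa using List.find?_some h)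
    have hlen : p.length ≤ s.length := hp.length_le
    have hpos : 0 < p.length := by fin_cases hm <;> simp
    simp only [List.length_drop]; omega

def normalize_file_path_py (path : String) : String :=
  if path = "" then path
  else
    let normalized := PySem.Str.replace path "\\" "/"
    let normalized := PySem.Str.stripChars normalized "/"
    String.ofList (pvChop normalized.toList)

-- ===== PORT B =====
-- B's `names` tuple
def pvNames : List (List Char) :=
  [ ['s','r','c','-','v','u','l'],
    ['s','r','c'],
    ['g','r','a','p','h','i','c','s','m','a','g','i','c','k'],
    ['r','e','p','o','-','v','u','l'],
    ['w','o','r','k','s','p','a','c','e'],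
    ['c','o','d','e','b','a','s','e'] ]

-- B's index walk `while i < len(parts)-1 and parts[i] in names: i += 1; return parts[i:]`
-- as the structural recursion over the component list.
def pvWalk : List (List Char) → List (List Char)
  | [] => []
  | p :: rest => if rest ≠ [] ∧ p ∈ pvNames then pvWalk rest else p :: rest

-- `normalized.split("/")` → List.splitOn '/', `"/".join(…)` → List.intercalate ['/']
def normalize_file_path_py_alt (path : String) : String :=
  if path = "" then path
  else
    let normalized := PySem.Str.stripChars (PySem.Str.replace path "\\" "/") "/"
    String.ofList (List.intercalate ['/'] (pvWalk (normalized.toList.splitOn '/')))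

-- ===== PRECONDITION & SPEC =====
def Spec_normalize_file_path_py (path : String) (out : String) : Prop := out = normalize_file_path_py_alt path
instance (path : String) (out : String) : Decidable (Spec_normalize_file_path_py path out) := by unfold Spec_normalize_file_path_py; infer_instance

-- ===== CLAIM (what is proved, stated in full; the proofs are below) =====
def Claim_equal_normalize_file_path_py : Prop := ∀ (path : String), Dom_normalize_file_path_py path → Spec_normalize_file_path_py path (normalize_file_path_py path)

-- ===== LEMMAS AND PROOFS =====

-- the heart of the equivalence: chopping matched "name/" prefixes off the string equals
-- walking past matched leading components of the split and rejoining
theorem pvChop_eq_walk (s : List Char) :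
    pvChop s = List.intercalate ['/'] (pvWalk (s.splitOn '/')) := by
  fun_induction pvChop s with
  | case1 s p h ih =>
      have hm := List.mem_of_find?_eq_some h
      have hp : p <+: s := (PySem.Chars.startswith_iff ..).mp (by simpa using List.find?_some h)
      obtain ⟨rest, rfl⟩ := hp
      simp only [pvPrefixes, List.mem_cons, List.not_mem_nil, or_false] at hm
      rcases hm with rfl|rfl|rfl|rfl|rfl|rfl <;>
      · rw [List.drop_left] at ih ⊢
        rw [ih]
        simp [List.splitOn, List.splitOnP_cons, List.cons_append, pvWalk, pvNames,
          List.splitOnP_ne_nil]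
  | case2 s h =>
      have hall := List.find?_eq_none.mp h
      rcases hsp : s.splitOn '/' with - | ⟨p, rest⟩
      · exact absurd hsp (by simpa [List.splitOn] using List.splitOnP_ne_nil (· == '/') s)
      · by_cases hc : rest ≠ [] ∧ p ∈ pvNames
        · exfalso
          obtain ⟨r, t, rfl⟩ : ∃ r t, rest = r :: t := by
            rcases rest with - | ⟨r, t⟩
            · exact absurd rfl hc.1
            · exact ⟨r, t, rfl⟩
          have hs : s = (p ++ ['/']) ++ List.intercalate ['/'] (r :: t) := by
            conv_lhs => rw [← List.intercalate_splitOn s '/', hsp]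
            simp [List.intercalate]
          have hmem : (p ++ ['/']) ∈ pvPrefixes := by
            have := hc.2
            simp only [pvNames, List.mem_cons, List.not_mem_nil, or_false] at this
            rcases this with rfl|rfl|rfl|rfl|rfl|rfl <;> decide
          exact absurd ((PySem.Chars.startswith_iff ..).mpr ⟨_, hs.symm⟩) (by simpa using hall _ hmem)
        · rw [pvWalk, if_neg hc, ← hsp, List.intercalate_splitOn]

theorem normalize_file_path_py_spec : Claim_equal_normalize_file_path_py := by
  intro path _
  unfold Spec_normalize_file_path_py normalize_file_path_py normalize_file_path_py_alt
  split
  · rfl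
  · exact congrArg String.ofList (pvChop_eq_walk _)
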